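-- pv_equiv track=rewrite | github.com/ib-m-j/dev | python/bridgescore.py | impScore
-- ===== SOURCE A (Python) =====
-- def impScore(difference):
--     thresholds = [0,20,50,90,130,170,220,270,320,370,430,500,600,750,900 \
--                   ,1100,1300,1500,1750,2000,2250,2500,3000,3500,4000, 10000]
--
--     if difference < 0:
--         sign = -1
--         difference = - difference
--     else:
--         sign = 1
--     for (n,x) in enumerate(thresholds):
--         if x>difference:
--             break
--     return sign*(n-1)
-- ===== SOURCE B (Python) =====
-- def impScore(difference):
--     thresholds = [0,20,50,90,130,170,220,270,320,370,430,500,600,750,900,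
--                   1100,1300,1500,1750,2000,2250,2500,3000,3500,4000,10000]
--     if difference < 0:
--         sign = -1
--         difference = -difference
--     else:
--         sign = 1
--     # binary search: lo ends as the number of thresholds <= difference
--     lo, hi = 0, len(thresholds)
--     while lo < hi:
--         mid = (lo + hi) // 2
--         if thresholds[mid] <= difference:
--             lo = mid + 1
--         else:
--             hi = mid
--     n = min(lo, len(thresholds) - 1)
--     return sign * (n - 1)
-- ===== Notes on version B (the rewrite author's own statement) =====
-- stated objective: alternative
-- what changed: The bucket index is located by binary search over the threshold table (bisect_right with the top index clamped) instead of A's linear enumerate-and-break scan.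
import Mathlib
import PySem

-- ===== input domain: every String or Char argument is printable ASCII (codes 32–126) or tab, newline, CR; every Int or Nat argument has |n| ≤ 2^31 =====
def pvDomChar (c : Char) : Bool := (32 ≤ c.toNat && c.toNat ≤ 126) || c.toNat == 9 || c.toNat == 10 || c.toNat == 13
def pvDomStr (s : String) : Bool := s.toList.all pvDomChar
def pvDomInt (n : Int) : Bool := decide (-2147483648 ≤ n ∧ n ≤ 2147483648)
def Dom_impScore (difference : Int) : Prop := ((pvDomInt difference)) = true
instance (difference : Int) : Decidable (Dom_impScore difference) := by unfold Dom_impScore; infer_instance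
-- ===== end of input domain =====

-- ===== PORT A =====
-- B locates the threshold bucket by binary search instead of A's linear scan; same result (alternative).
def impThresholds : List Int :=
  [0,20,50,90,130,170,220,270,320,370,430,500,600,750,900,
   1100,1300,1500,1750,2000,2250,2500,3000,3500,4000,10000]

-- 'for (n,x) in enumerate(thresholds): if x>difference: break': n is the index at the break,
-- or the last index when the loop finishes without breaking.
def impLoop (pairs : List (Int × Int)) (difference : Int) (n : Int) : Int :=
  match pairs with
  | [] => n
  | (i, x) :: rest => if x > difference then i else impLoop rest difference i

def impScore (difference : Int) : Int :=
  let sign : Int := if difference < 0 then -1 else 1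
  let d : Int := if difference < 0 then -difference else difference
  let n : Int := impLoop (PySem.List.enumerate impThresholds) d 0
  sign * (n - 1)

-- ===== PORT B =====
-- hand-written binary search of Source B; thresholds[mid] via getD (mid is always in range)
def impBsearch (ts : List Int) (d : Int) (lo hi : Nat) : Nat :=
  if h : lo < hi then
    let mid := (lo + hi) / 2
    if ts.getD mid 0 <= d then impBsearch ts d (mid + 1) hi else impBsearch ts d lo mid
  else lo
termination_by hi - lo
decreasing_by all_goals omega

def impScore_alt (difference : Int) : Int :=
  let sign : Int := if difference < 0 then -1 else 1
  let d : Int := if difference < 0 then -difference else difference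
  let lo := impBsearch impThresholds d 0 impThresholds.length
  let n := min lo (impThresholds.length - 1)
  sign * ((n : Int) - 1)

-- ===== PRECONDITION & SPEC =====
def Spec_impScore (difference : Int) (out : Int) : Prop := out = impScore_alt difference
instance (difference : Int) (out : Int) : Decidable (Spec_impScore difference out) := by unfold Spec_impScore; infer_instance

-- ===== CLAIM (what is proved, stated in full; the proofs are below) =====
def Claim_equal_impScore : Prop := ∀ (difference : Int), Dom_impScore difference → Spec_impScore difference (impScore difference)

-- ===== LEMMAS AND PROOFS =====
-- the threshold table is (weakly) sorted, getD view
theorem impThresholds_sorted (i j : Nat) (hij : i ≤ j) (hj : j < impThresholds.length) :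
    impThresholds.getD i 0 ≤ impThresholds.getD j 0 := by
  have hi : i < impThresholds.length := lt_of_le_of_lt hij hj
  rw [List.getD_eq_getElem _ _ hi, List.getD_eq_getElem _ _ hj]
  rcases Nat.eq_or_lt_of_le hij with h | h
  · subst h; exact le_refl _
  · have hs : List.Pairwise (· ≤ ·) impThresholds := by
      unfold impThresholds; decide
    exact List.Pairwise.rel_get_of_lt hs (by simpa using h)

-- invariant characterisation of the binary search
theorem impBsearch_char (ts : List Int) (d : Int)
    (hsort : ∀ i j : Nat, i ≤ j → j < ts.length → ts.getD i 0 ≤ ts.getD j 0) :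
    ∀ (n lo hi : Nat), hi - lo ≤ n → lo ≤ hi → hi ≤ ts.length →
      (∀ i, i < lo → ts.getD i 0 ≤ d) →
      (∀ i, hi ≤ i → i < ts.length → d < ts.getD i 0) →
      lo ≤ impBsearch ts d lo hi ∧ impBsearch ts d lo hi ≤ hi ∧
      (∀ i, i < impBsearch ts d lo hi → ts.getD i 0 ≤ d) ∧
      (∀ i, impBsearch ts d lo hi ≤ i → i < ts.length → d < ts.getD i 0) := by
  intro n
  induction n with
  | zero =>
    intro lo hi hfuel hle hhi hpre hpost
    have heq : lo = hi := by omega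
    rw [impBsearch]
    simp only [heq, lt_irrefl, dite_false]
    exact ⟨le_refl _, le_refl _, fun i hi' => hpre i (heq ▸ hi'), fun i hi' => hpost i (heq ▸ hi')⟩
  | succ m ih =>
    intro lo hi hfuel hle hhi hpre hpost
    rw [impBsearch]
    by_cases h : lo < hi
    · simp only [h, dite_true]
      set mid := (lo + hi) / 2 with hmid
      have hmlo : lo ≤ mid := by omega
      have hmhi : mid < hi := by omega
      by_cases hp : ts.getD mid 0 ≤ d
      · simp only [hp, if_true]
        obtain ⟨a, b, c, e⟩ := ih (mid + 1) hi (by omega) (by omega) hhi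
          (fun i hi' => le_trans (hsort i mid (by omega) (by omega)) hp) hpost
        exact ⟨by omega, b, c, e⟩
      · simp only [hp, if_false]
        obtain ⟨a, b, c, e⟩ := ih lo mid (by omega) (by omega) (by omega) hpre
          (fun i hi' hilen => lt_of_lt_of_le (not_le.mp hp) (hsort mid i hi' hilen))
        exact ⟨a, by omega, c, e⟩
    · simp only [h, dite_false]
      exact ⟨le_refl _, hle, fun i hi' => hpre i hi',
        fun i hi' hilen => hpost i (by omega) hilen⟩

-- A's enumerate-loop computes s + min (length of the ≤-prefix) (length - 1)
theorem impLoop_char (d : Int) :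
    ∀ (ts : List Int) (s n : Int), ts ≠ [] →
      impLoop (PySem.List.enumerate ts s) d n
        = s + min ((ts.takeWhile (fun x => decide (x ≤ d))).length) (ts.length - 1) := by
  intro ts
  induction ts with
  | nil => intro s n h; exact absurd rfl h
  | cons x r ihr =>
    intro s n _
    rw [PySem.List.enumerate_cons]
    by_cases hx : x > d
    · simp [impLoop, hx, not_le.mpr hx]
    · have hxd : x ≤ d := not_lt.mp hx
      simp only [impLoop, if_neg (not_lt.mpr hxd)]
      cases r with
      | nil => simp [PySem.List.enumerate_nil, impLoop, hxd]
      | cons y q =>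
        rw [ihr (s + 1) s (by simp)]
        simp only [List.takeWhile_cons, decide_eq_true_eq, if_pos hxd, List.length_cons]
        have h1 : (List.takeWhile (fun x => decide (x ≤ d)) (y :: q)).length ≤ (y :: q).length :=
          (List.takeWhile_sublist _).length_le
        simp only [List.length_cons] at h1 ⊢
        omega

-- length of the ≤-prefix is determined by the pointwise characterisation from the search
theorem takeWhile_len_eq (d : Int) :
    ∀ (ts : List Int) (k : Nat), k ≤ ts.length →
      (∀ i, i < k → ts.getD i 0 ≤ d) →
      (k = ts.length ∨ d < ts.getD k 0) →
      (ts.takeWhile (fun x => decide (x ≤ d))).length = k := by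
  intro ts
  induction ts with
  | nil => intro k hk _ _; simp at hk; simp [hk]
  | cons x r ihr =>
    intro k hk hpre hend
    cases k with
    | zero =>
      rcases hend with h | h
      · simp at h
      · simp only [List.getD_cons_zero] at h
        simp [not_le.mpr h]
    | succ m =>
      have hx : x ≤ d := by simpa using hpre 0 (Nat.succ_pos m)
      simp only [List.takeWhile_cons, decide_eq_true_eq, if_pos hx, List.length_cons]
      have := ihr m (by simpa using hk)
        (fun i hi' => by simpa using hpre (i + 1) (by omega))
        (by rcases hend with h | h
            · left; simpa using h
            · right; simpa using h)
      omega

-- the two bucket indices coincide for nonnegative d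
theorem impScore_agree (d : Int) :
    impLoop (PySem.List.enumerate impThresholds) d 0
      = ((min (impBsearch impThresholds d 0 impThresholds.length) (impThresholds.length - 1) : Nat) : Int) := by
  have hlen : impThresholds.length = 26 := by unfold impThresholds; simp
  obtain ⟨hlo, hhi, hall, hnone⟩ :=
    impBsearch_char impThresholds d impThresholds_sorted impThresholds.length 0
      impThresholds.length (by omega) (by omega) (le_refl _)
      (fun i hi' => absurd hi' (Nat.not_lt_zero i)) (fun i hi' hilen => by omega)
  set r := impBsearch impThresholds d 0 impThresholds.length with hr
  have htw : (impThresholds.takeWhile (fun x => decide (x ≤ d))).length = r := by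
    apply takeWhile_len_eq d impThresholds r hhi hall
    rcases Nat.eq_or_lt_of_le hhi with h | h
    · exact Or.inl h
    · exact Or.inr (hnone r (le_refl r) h)
  rw [impLoop_char d impThresholds 0 0 (by unfold impThresholds; simp), htw]
  push_cast
  omega

-- ===== VERDICT (by name: the statement is the Claim_ definition above) =====
theorem impScore_spec : Claim_equal_impScore := by
  intro d _
  unfold Spec_impScore impScore impScore_alt
  by_cases h : d < 0 <;> simp only [h, if_true, if_false] <;>
    rw [impScore_agree]
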